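-- pv_equiv track=rewrite | github.com/lolo-park/Programmers | programmers/num_three.py | solution
-- ===== SOURCE A (Python) =====
-- def solution(n):
--     answer = []
--
--     for i in range(1, n + 1):
--         answer.append(i)  # [1,2,3,4,5]
--         for j in answer:
--             if j % 3 == 0:
--                 answer.remove(j)
--     # 여기서 answer 리스트가 세팅 되고 [1,2,4,5]
--
--     new_list = []
--     latest_list = []
--
--     for k in range(len(answer)):
--         new_list.append(str(answer[k]))
--     # 새로운 빈 리스트 new_list에 리스트 answer의 요소들을 문자열로 세팅
--     # new_list = ['1', '2', '4', '5', '7', '8', '10', '11', '13', '14', '16', '17', '19', '20']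
--     for h in range(len(new_list)):
--         if '3' in new_list[h]:
--             latest_list.append(new_list[h])  # 여기까지 ['13']에 접근
--
--     for last in new_list:
--         if last in latest_list:
--             new_list.remove(last)
--
--     return new_list[len(new_list) - 1]  # 마지막리스트에 접근 하는 건데.. 이건 잘못된 듯
-- ===== SOURCE B (Python) =====
-- def solution(n):
--     # Walk down from n and return the first number that is neither a multiple
--     # of 3 nor contains the digit 3.
--     i = n
--     while i >= 1:
--         if i % 3 != 0 and '3' not in str(i):
--             return str(i)
--         i -= 1
-- ===== Notes on version B (the rewrite author's own statement) =====
-- stated objective: faster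
-- what changed: A builds the whole 1..n list with three quadratic remove-while-iterating rescans and returns its last element; B simply walks down from n and returns the first number that is neither a multiple of 3 nor contains the digit 3; Pre_ excludes n < 1, where A raises IndexError on the empty list.
-- intended difference: When the last two non-multiples of 3 up to n both contain the digit 3 (e.g. n = 32: 31 and 32), A's final remove-while-iterating loop skips the element after each removal and so returns a string still containing '3' (A(32) = '32'), while B returns the last number without a '3' ('29'), which is the intended value since the function's purpose is to drop every number containing 3. — e.g. on solution(32): A returns "32", B returns "29"
import Mathlib
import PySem

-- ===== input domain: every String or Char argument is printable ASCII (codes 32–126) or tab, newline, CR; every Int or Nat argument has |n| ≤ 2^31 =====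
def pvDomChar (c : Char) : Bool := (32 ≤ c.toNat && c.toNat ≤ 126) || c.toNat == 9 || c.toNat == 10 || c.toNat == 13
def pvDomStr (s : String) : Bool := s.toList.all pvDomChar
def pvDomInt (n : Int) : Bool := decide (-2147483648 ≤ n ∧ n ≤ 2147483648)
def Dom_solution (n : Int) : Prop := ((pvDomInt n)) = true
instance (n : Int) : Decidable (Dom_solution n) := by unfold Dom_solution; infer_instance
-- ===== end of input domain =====

-- B walks down from n and returns the first number that is neither a multiple of 3 nor
-- contains the digit 3 (objective: faster); where A's remove-while-iterating loop keeps a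
-- '3'-containing number at the end, B differs intentionally (see D_solution).

-- ===== PORT A =====

-- 'for j in answer: if j % 3 == 0: answer.remove(j)' — CPython iterates with an internal
-- cursor over the mutating list: the state is the (already passed, still ahead) split of the
-- list at the cursor ('done' is kept reversed and restored at the end).  answer.remove(j)
-- removes the first occurrence of j, which is the cursor element because 'answer' (a subset
-- of 1..n in order) never holds duplicates — exactly there this cursor port is exact; after a
-- removal the cursor advances past the element that slid into its place, so that element is
-- appended unexamined, as in CPython.
def pyLoopRem3 (done : List Int) : List Int → List Int
  | [] => done.reverse
  | [j] => if PySem.Int.mod j 3 == 0 then done.reverse else (j :: done).reverse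
  | j :: x :: rest =>
    if PySem.Int.mod j 3 == 0 then pyLoopRem3 (x :: done) rest
    else pyLoopRem3 (j :: done) (x :: rest)

-- 'for last in new_list: if last in latest_list: new_list.remove(last)' — the same cursor
-- iteration; new_list (decimal strings of distinct numbers) is duplicate-free, so the removed
-- first occurrence is again the cursor element.
def pyLoopRemIn (latest : List String) (done : List String) : List String → List String
  | [] => done.reverse
  | [x] => if latest.contains x then done.reverse else (x :: done).reverse
  | x :: y :: rest =>
    if latest.contains x then pyLoopRemIn latest (y :: done) rest
    else pyLoopRemIn latest (x :: done) (y :: rest)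

def solution (n : Int) : String :=
  let answer := (PySem.List.pyRange 1 (n + 1)).foldl
      (fun acc i => pyLoopRem3 [] (acc ++ [i])) []
  let new_list := (PySem.List.pyRange 0 (PySem.List.len answer)).foldl
      (fun acc k => acc ++ [PySem.Int.toStr (PySem.List.pyGetD answer k 0)]) []
  let latest_list := (PySem.List.pyRange 0 (PySem.List.len new_list)).foldl
      (fun acc h => if PySem.Str.isIn "3" (PySem.List.pyGetD new_list h "") then
          acc ++ [PySem.List.pyGetD new_list h ""] else acc) []
  let final := pyLoopRemIn latest_list [] new_list
  -- new_list[len(new_list) - 1]; IndexError (empty list, n < 1) is excluded by Pre_solution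
  (PySem.List.pyGet? final (PySem.List.len final - 1)).getD ""

-- ===== PORT B =====

-- 'while i >= 1: if i % 3 != 0 and "3" not in str(i): return str(i); i -= 1' — the countdown;
-- 'i % 3 != 0' is ported as the negated equality test !(mod i 3 == 0), which is what != computes.
-- is structural recursion on i.toNat (i = k+1 at each step); returns "" where the loop would
-- fall through (n < 1, outside Pre_solution, where Python B returns None).
def solAltGo : Nat → String
  | 0 => ""
  | k + 1 =>
    if !(PySem.Int.mod ((k : Int) + 1) 3 == 0) && !(PySem.Str.isIn "3" (PySem.Int.toStr ((k : Int) + 1))) then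
      PySem.Int.toStr ((k : Int) + 1)
    else solAltGo k

def solution_alt (n : Int) : String := solAltGo n.toNat

-- ===== PRECONDITION & SPEC =====
-- Pre_ excludes exactly n < 1, where the Python A raises IndexError (new_list ends up empty).
def Pre_solution (n : Int) : Prop := 1 ≤ n
instance (n : Int) : Decidable (Pre_solution n) := by unfold Pre_solution; infer_instance
def pvWitness_solution : Int := (5)

-- the last non-multiple of 3 up to n, and the one before it
def pvL (n : Int) : Int := if PySem.Int.mod n 3 = 0 then n - 1 else n
def pvP (n : Int) : Int := if PySem.Int.mod (pvL n - 1) 3 = 0 then pvL n - 2 else pvL n - 1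

-- When the last two non-multiples of 3 up to n both contain the digit 3 (e.g. n = 32: 31, 32),
-- A's final remove-while-iterating loop skips the element after each removal and returns a
-- string still containing '3' (A(32) = "32"); B returns the last number without a '3' ("29"),
-- the intended value since the function's purpose is to drop every number containing 3.
def D_solution (n : Int) : Prop := 2 ≤ n ∧
  PySem.Str.isIn "3" (PySem.Int.toStr (pvL n)) = true ∧
  PySem.Str.isIn "3" (PySem.Int.toStr (pvP n)) = true
instance (n : Int) : Decidable (D_solution n) := by unfold D_solution; infer_instance

def Spec_solution (n : Int) (out : String) : Prop := ¬ D_solution n → out = solution_alt n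
instance (n : Int) (out : String) : Decidable (Spec_solution n out) := by
  unfold Spec_solution; infer_instance

def pvDiffWitness_solution : Int := (32)
def pvDiffWitnessOut_solution : String × String := ("32", "29")

-- ===== CLAIM (what is proved, stated in full; the proofs are below) =====
def Claim_unchanged_solution : Prop :=
  ∀ (n : Int), Dom_solution n → Pre_solution n → Spec_solution n (solution n)
def Claim_changed_solution : Prop :=
  Dom_solution (pvDiffWitness_solution) ∧ Pre_solution (pvDiffWitness_solution) ∧
  D_solution (pvDiffWitness_solution) ∧
  solution (pvDiffWitness_solution) = pvDiffWitnessOut_solution.1 ∧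
  solution_alt (pvDiffWitness_solution) = pvDiffWitnessOut_solution.2 ∧
  pvDiffWitnessOut_solution.1 ≠ pvDiffWitnessOut_solution.2
def Claim_exact_solution : Prop :=
  ∀ (n : Int), Dom_solution n → Pre_solution n → D_solution n → solution n ≠ solution_alt n

-- ===== LEMMAS AND PROOFS =====

def pvQ (i : Int) : Bool := !(PySem.Int.mod i 3 == 0)
def pvP3 (s : String) : Bool := PySem.Str.isIn "3" s

-- the strings A's pipeline works over: non-multiples of 3 in 1..n, as decimal strings
def pvM (n : Int) : List String :=
  ((PySem.List.pyRange 1 (n + 1)).filter pvQ).map PySem.Int.toStr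

-- the skip-pass A's last loop performs: mode 'true' = previous element was removed,
-- so this one is kept unchecked
def pvRun (p : String → Bool) : Bool → List String → List String
  | _, [] => []
  | true, x :: xs => x :: pvRun p false xs
  | false, x :: xs => if p x then pvRun p true xs else x :: pvRun p false xs

-- pvQ via divisibility
theorem pv_pvQ_true (j : Int) (h : ¬ 3 ∣ j) : pvQ j = true := by
  simp [pvQ]
  exact h

theorem pv_pvQ_false (j : Int) (h : 3 ∣ j) : pvQ j = false := by
  simp [pvQ]
  exact h

-- phase 1's inner loop on a list without multiples of 3 keeps everything …
theorem pv_rem3_clean : ∀ (l : List Int) (done : List Int),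
    (∀ j ∈ l, ¬ PySem.Int.mod j 3 = 0) → pyLoopRem3 done l = done.reverse ++ l := by
  intro l
  induction l with
  | nil => intro done _; simp [pyLoopRem3]
  | cons j rest ih =>
    intro done h
    have hj : (PySem.Int.mod j 3 == 0) = false := by simpa using h j List.mem_cons_self
    have htl := fun x hx => h x (List.mem_cons_of_mem _ hx)
    cases rest with
    | nil => rw [pyLoopRem3, if_neg (by rw [hj]; exact Bool.false_ne_true)]; simp
    | cons x rest' =>
      rw [pyLoopRem3, if_neg (by rw [hj]; exact Bool.false_ne_true), ih (j :: done) htl]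
      simp

-- … and on such a list followed by one multiple of 3 it removes exactly that element
theorem pv_rem3_last (m : Int) (hm : PySem.Int.mod m 3 = 0) :
    ∀ (l' : List Int) (done : List Int), (∀ j ∈ l', ¬ PySem.Int.mod j 3 = 0) →
      pyLoopRem3 done (l' ++ [m]) = done.reverse ++ l' := by
  intro l'
  induction l' with
  | nil =>
    intro done _
    rw [List.nil_append, pyLoopRem3, if_pos (by rw [hm]; rfl)]
    simp
  | cons j rest ih =>
    intro done h
    have hj : (PySem.Int.mod j 3 == 0) = false := by simpa using h j List.mem_cons_self
    have htl := fun x hx => h x (List.mem_cons_of_mem _ hx)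
    cases rest with
    | nil =>
      rw [List.cons_append, List.nil_append, pyLoopRem3, if_neg (by rw [hj]; exact Bool.false_ne_true),
        pyLoopRem3, if_pos (by rw [hm]; rfl)]
      simp
    | cons x rest' =>
      rw [List.cons_append, List.cons_append, pyLoopRem3, if_neg (by rw [hj]; exact Bool.false_ne_true)]
      have := ih (j :: done) htl
      rw [List.cons_append] at this
      rw [this]
      simp

-- phase 1: the whole first loop is a filter
theorem pv_phase1 (l : List Int) (acc : List Int)
    (hc : ∀ j ∈ acc, ¬ PySem.Int.mod j 3 = 0) :
    l.foldl (fun acc i => pyLoopRem3 [] (acc ++ [i])) acc = acc ++ l.filter pvQ := by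
  induction l generalizing acc with
  | nil => simp
  | cons i l ih =>
    simp only [List.foldl_cons]
    by_cases hi : PySem.Int.mod i 3 = 0
    · rw [pv_rem3_last i hi acc [] hc, List.reverse_nil, List.nil_append, ih acc hc]
      have hq : pvQ i = false := pv_pvQ_false i ((PySem.Int.mod_eq_zero_iff_dvd i 3).mp hi)
      simp [hq]
    · have hacc' : ∀ j ∈ acc ++ [i], ¬ PySem.Int.mod j 3 = 0 := by
        intro j hj
        rcases List.mem_append.mp hj with h1 | h1
        · exact hc j h1
        · simpa [List.mem_singleton.mp h1] using hi
      rw [pv_rem3_clean (acc ++ [i]) [] hacc', List.reverse_nil, List.nil_append, ih _ hacc']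
      have hq : pvQ i = true :=
        pv_pvQ_true i (fun hd => hi ((PySem.Int.mod_eq_zero_iff_dvd i 3).mpr hd))
      simp [hq]

-- phase 3: the remove-while-iterating loop is exactly the skip-pass pvRun
theorem pv_loopRemIn_run (latest : List String) :
    ∀ (k : Nat) (xs : List String), xs.length ≤ k → ∀ (done : List String),
      pyLoopRemIn latest done xs = done.reverse ++ pvRun (latest.contains ·) false xs := by
  intro k
  induction k with
  | zero =>
    intro xs hk done
    obtain rfl : xs = [] := List.eq_nil_of_length_eq_zero (by omega)
    simp [pyLoopRemIn, pvRun]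
  | succ k ih =>
    intro xs hk done
    cases xs with
    | nil => simp [pyLoopRemIn, pvRun]
    | cons x rest =>
      by_cases hc : latest.contains x
      · have hxm : x ∈ latest := List.contains_iff_mem.mp hc
        cases rest with
        | nil =>
          rw [pyLoopRemIn, if_pos hc]
          simp [pvRun, hxm]
        | cons y rest' =>
          rw [pyLoopRemIn, if_pos hc, ih rest' (by simp at hk; omega) (y :: done)]
          simp [pvRun, hxm]
      · have hxm : x ∉ latest := fun h => hc (List.contains_iff_mem.mpr h)
        cases rest with
        | nil =>
          rw [pyLoopRemIn, if_neg hc]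
          simp [pvRun, hxm]
        | cons y rest' =>
          rw [pyLoopRemIn, if_neg hc, ih (y :: rest') (by simp at hk ⊢; omega) (x :: done)]
          simp [pvRun, hxm]

theorem pv_run_congr (p r : String → Bool) :
    ∀ (b : Bool) (xs : List String), (∀ x ∈ xs, p x = r x) → pvRun p b xs = pvRun r b xs := by
  intro b xs
  induction xs generalizing b with
  | nil => intro _; cases b <;> rfl
  | cons x xs ih =>
    intro h
    have htail : ∀ y ∈ xs, p y = r y := fun y hy => h y (List.mem_cons_of_mem _ hy)
    cases b with
    | true => simp only [pvRun]; rw [ih false htail]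
    | false => simp only [pvRun, h x List.mem_cons_self, ih true htail, ih false htail]

theorem pv_pyGet_last (F : List String) :
    (PySem.List.pyGet? F (PySem.List.len F - 1)).getD "" = F.getLastD "" := by
  cases F with
  | nil => rfl
  | cons x F' =>
    rw [PySem.List.len_eq]
    have h1 : ((x :: F').length : Int) - 1 = ((F'.length : Nat) : Int) := by simp
    rw [h1, PySem.List.pyGet?_natCast, List.getLastD_eq_getLast?, List.getLast?_eq_getElem?]
    simp

theorem pv_contains_filter (M : List String) :
    ∀ x ∈ M, (M.filter pvP3).contains x = pvP3 x := by
  intro x hx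
  by_cases hp : pvP3 x = true
  · rw [hp]
    exact List.contains_iff_mem.mpr (List.mem_filter.mpr ⟨hx, hp⟩)
  · have hp' : pvP3 x = false := by simpa using hp
    rw [hp']
    rw [← Bool.not_eq_true]
    intro hc
    exact hp (List.mem_filter.mp (List.contains_iff_mem.mp hc)).2

-- A's whole pipeline: the skip-pass over pvM n, last element (default "")
theorem pv_A_run (n : Int) : solution n = (pvRun pvP3 false (pvM n)).getLastD "" := by
  unfold solution
  simp only []
  rw [pv_phase1 _ [] (by simp), List.nil_append]
  rw [PySem.List.foldl_pyRange_pyGetD _ 0 (fun acc v => acc ++ [PySem.Int.toStr v]) []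
    (by norm_num), Int.toNat_zero, List.drop_zero, PySem.List.foldl_append_singleton_eq_map,
    List.nil_append]
  rw [PySem.List.foldl_pyRange_pyGetD _ "" (fun acc v =>
      if PySem.Str.isIn "3" v = true then acc ++ [v] else acc) []
    (by norm_num), Int.toNat_zero, List.drop_zero]
  have hfilter : List.foldl (fun acc v => if PySem.Str.isIn "3" v = true then acc ++ [v] else acc)
      [] (pvM n) = (pvM n).filter pvP3 := by
    have h0 := PySem.List.foldl_append_if (fun v => PySem.Str.isIn "3" v) id (pvM n) []
    simpa [pvP3] using h0
  rw [show ((PySem.List.pyRange 1 (n + 1)).filter pvQ).map PySem.Int.toStr = pvM n from rfl,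
    hfilter]
  have hloop := pv_loopRemIn_run ((pvM n).filter pvP3) (pvM n).length (pvM n) (le_refl _) []
  simp only [List.reverse_nil, List.nil_append] at hloop
  rw [hloop, pv_run_congr _ pvP3 false _ (pv_contains_filter _), pv_pyGet_last]

-- getLastD of a list ending in a kept element
theorem pv_getLastD_concat (l : List String) (a : String) (d : String) :
    (l ++ [a]).getLastD d = a := by
  rw [List.getLastD_eq_getLast?, List.getLast?_concat]; rfl

-- the skip-pass ends with the final non-'3' element when the list ends with one …
theorem pv_run_last_good (p : String → Bool) (a : String) (hpa : p a = false) :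
    ∀ (ys : List String) (b : Bool) (d : String), (pvRun p b (ys ++ [a])).getLastD d = a := by
  intro ys
  induction ys with
  | nil =>
    intro b d
    cases b <;> simp [pvRun, hpa]
  | cons x ys ih =>
    intro b d
    cases b with
    | true => simp only [List.cons_append, pvRun, List.getLastD_cons]; exact ih false x
    | false =>
      by_cases hp : p x = true
      · simp only [List.cons_append, pvRun, hp, if_true]; exact ih true d
      · have hp' : p x = false := by simpa using hp
        simp only [List.cons_append, pvRun, hp', Bool.false_eq_true, if_false,
          List.getLastD_cons]
        exact ih false x

-- … and with the second-to-last when only the very last contains a '3'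
theorem pv_run_last_pair (p : String → Bool) (a z : String)
    (hpa : p a = false) (hpz : p z = true) :
    ∀ (ys : List String) (b : Bool) (d : String),
      (pvRun p b (ys ++ [a, z])).getLastD d = a := by
  intro ys
  induction ys with
  | nil =>
    intro b d
    cases b <;> simp [pvRun, hpa, hpz]
  | cons x ys ih =>
    intro b d
    cases b with
    | true => simp only [List.cons_append, pvRun, List.getLastD_cons]; exact ih false x
    | false =>
      by_cases hp : p x = true
      · simp only [List.cons_append, pvRun, hp, if_true]; exact ih true d
      · have hp' : p x = false := by simpa using hp
        simp only [List.cons_append, pvRun, hp', Bool.false_eq_true, if_false,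
          List.getLastD_cons]
        exact ih false x

-- when the last two elements both contain '3', the skip-pass still ends in one of them
theorem pv_run_last_pp (p : String → Bool) (a z : String)
    (hpa : p a = true) (hpz : p z = true) :
    ∀ (ys : List String) (b : Bool) (d : String),
      (pvRun p b (ys ++ [a, z])).getLastD d = a ∨ (pvRun p b (ys ++ [a, z])).getLastD d = z := by
  intro ys
  induction ys with
  | nil =>
    intro b d
    cases b with
    | true => left; simp [pvRun, hpz]
    | false => right; simp [pvRun, hpa, hpz]
  | cons x ys ih =>
    intro b d
    cases b with
    | true => simp only [List.cons_append, pvRun, List.getLastD_cons]; exact ih false x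
    | false =>
      by_cases hp : p x = true
      · simp only [List.cons_append, pvRun, hp, if_true]; exact ih true d
      · have hp' : p x = false := by simpa using hp
        simp only [List.cons_append, pvRun, hp', Bool.false_eq_true, if_false,
          List.getLastD_cons]
        exact ih false x

-- B's countdown equals the last '3'-free entry of pvM
theorem pv_alt_filter : ∀ (k : Nat),
    solAltGo k = ((pvM (k : Int)).filter (fun s => !pvP3 s)).getLastD "" := by
  intro k
  induction k with
  | zero =>
    simp [solAltGo, pvM, PySem.List.pyRange_one_eq_nil]
  | succ k ih =>
    have hcast : ((k + 1 : Nat) : Int) = (k : Int) + 1 := by push_cast; ring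
    have hsplit : PySem.List.pyRange 1 (((k + 1 : Nat) : Int) + 1) =
        PySem.List.pyRange 1 ((k : Int) + 1) ++ [(k : Int) + 1] := by
      rw [hcast, PySem.List.pyRange_one_succ_right (by omega)]
    rw [solAltGo, pvM, hsplit]
    by_cases hq : pvQ ((k : Int) + 1) = true
    · by_cases hp : pvP3 (PySem.Int.toStr ((k : Int) + 1)) = true
      · have hcond : (!(PySem.Int.mod ((k : Int) + 1) 3 == 0) &&
            !(PySem.Str.isIn "3" (PySem.Int.toStr ((k : Int) + 1)))) = false := by
          have hp2 : PySem.Str.isIn "3" (PySem.Int.toStr ((k : Int) + 1)) = true := hp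
          rw [hp2]
          simp
        rw [hcond]
        simp only [Bool.false_eq_true, if_false]
        rw [List.filter_append, List.map_append, List.filter_append]
        rw [show List.filter pvQ [(k : Int) + 1] = [(k : Int) + 1] from by simp [hq]]
        rw [show List.map PySem.Int.toStr [(k : Int) + 1] =
          [PySem.Int.toStr ((k : Int) + 1)] from rfl]
        rw [show List.filter (fun s => !pvP3 s) [PySem.Int.toStr ((k : Int) + 1)] = []
          from by simp [hp]]
        rw [List.append_nil]
        exact ih
      · have hp' : pvP3 (PySem.Int.toStr ((k : Int) + 1)) = false := by simpa using hp
        have hcond : (!(PySem.Int.mod ((k : Int) + 1) 3 == 0) &&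
            !(PySem.Str.isIn "3" (PySem.Int.toStr ((k : Int) + 1)))) = true := by
          have hq2 : (!(PySem.Int.mod ((k : Int) + 1) 3 == 0)) = true := hq
          have hp2 : PySem.Str.isIn "3" (PySem.Int.toStr ((k : Int) + 1)) = false := hp'
          rw [hq2, hp2]
          rfl
        rw [hcond, if_pos rfl]
        rw [List.filter_append, List.map_append, List.filter_append]
        rw [show List.filter pvQ [(k : Int) + 1] = [(k : Int) + 1] from by simp [hq]]
        rw [show List.map PySem.Int.toStr [(k : Int) + 1] =
          [PySem.Int.toStr ((k : Int) + 1)] from rfl]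
        rw [show List.filter (fun s => !pvP3 s) [PySem.Int.toStr ((k : Int) + 1)] =
          [PySem.Int.toStr ((k : Int) + 1)] from by simp [hp']]
        exact (pv_getLastD_concat _ _ _).symm
    · have hq' : pvQ ((k : Int) + 1) = false := by simpa using hq
      have hcond : (!(PySem.Int.mod ((k : Int) + 1) 3 == 0) &&
          !(PySem.Str.isIn "3" (PySem.Int.toStr ((k : Int) + 1)))) = false := by
        have hq2 : (!(PySem.Int.mod ((k : Int) + 1) 3 == 0)) = false := hq'
        rw [hq2]
        rfl
      rw [hcond]
      simp only [Bool.false_eq_true, if_false]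
      rw [List.filter_append, List.map_append, List.filter_append]
      rw [show List.filter pvQ [(k : Int) + 1] = [] from by simp [hq']]
      rw [show List.map PySem.Int.toStr ([] : List Int) = [] from rfl]
      rw [show List.filter (fun s => !pvP3 s) ([] : List String) = [] from rfl]
      rw [List.append_nil]
      exact ih

theorem pv_alt_filter' (n : Int) (h : 0 ≤ n) :
    solution_alt n = ((pvM n).filter (fun s => !pvP3 s)).getLastD "" := by
  have := pv_alt_filter n.toNat
  rw [solution_alt, this, Int.toNat_of_nonneg h]

-- nothing the (¬'3')-filter keeps contains a '3'
theorem pv_filter_last_no3 (xs : List String) :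
    pvP3 ((xs.filter (fun s => !pvP3 s)).getLastD "") = false := by
  cases hl : xs.filter (fun s => !pvP3 s) with
  | nil => decide
  | cons a l =>
    have hmem : (a :: l).getLastD "" ∈ a :: l := by
      rw [List.getLastD_eq_getLast?, List.getLast?_eq_some_getLast (by simp)]
      simp only [Option.getD_some]
      exact List.getLast_mem _
    have : (a :: l).getLastD "" ∈ xs.filter (fun s => !pvP3 s) := hl ▸ hmem
    have := (List.mem_filter.mp this).2
    simpa using this

-- the filtered range ends with [pvP n, pvL n]
theorem pv_decomp (n : Int) (h2 : 2 ≤ n) :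
    (PySem.List.pyRange 1 (n + 1)).filter pvQ =
      ((PySem.List.pyRange 1 (pvP n)).filter pvQ) ++ [pvP n, pvL n] := by
  have h3 : n % 3 = 0 ∨ n % 3 = 1 ∨ n % 3 = 2 := by omega
  rcases h3 with h3 | h3 | h3
  · -- n ≡ 0: L = n-1, P = n-2, tail of range = [n-2, n-1, n]
    have hdn : 3 ∣ n := by omega
    have hdn1 : ¬ 3 ∣ (n - 1) := by omega
    have hdn2 : ¬ 3 ∣ (n - 2) := by omega
    have hL : pvL n = n - 1 := by
      rw [pvL, if_pos ((PySem.Int.mod_eq_zero_iff_dvd n 3).mpr hdn)]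
    have hP : pvP n = n - 2 := by
      rw [pvP, hL]
      rw [if_neg (fun hc => hdn2 ((PySem.Int.mod_eq_zero_iff_dvd _ 3).mp
        (by rwa [show n - 1 - 1 = n - 2 by ring] at hc)))]
      ring
    have htail : PySem.List.pyRange (n - 2) (n + 1) = [n - 2, n - 1, n] := by
      rw [PySem.List.pyRange_one_cons (by omega), PySem.List.pyRange_one_cons (by omega),
        PySem.List.pyRange_one_cons (by omega), PySem.List.pyRange_one_eq_nil (by omega)]
      simp only [List.cons.injEq]
      norm_num
      omega
    rw [PySem.List.pyRange_one_append 1 (n - 2) (n + 1) (by omega) (by omega), htail,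
      List.filter_append, hP, hL]
    congr 1
    simp [pv_pvQ_true _ hdn2, pv_pvQ_true _ hdn1, pv_pvQ_false _ hdn]
  · -- n ≡ 1: L = n, P = n-2, tail of range = [n-2, n-1, n]
    have hdn : ¬ 3 ∣ n := by omega
    have hdn1 : 3 ∣ (n - 1) := by omega
    have hdn2 : ¬ 3 ∣ (n - 2) := by omega
    have hL : pvL n = n := by
      rw [pvL, if_neg (fun hc => hdn ((PySem.Int.mod_eq_zero_iff_dvd n 3).mp hc))]
    have hP : pvP n = n - 2 := by
      rw [pvP, hL, if_pos ((PySem.Int.mod_eq_zero_iff_dvd _ 3).mpr hdn1)]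
    have htail : PySem.List.pyRange (n - 2) (n + 1) = [n - 2, n - 1, n] := by
      rw [PySem.List.pyRange_one_cons (by omega), PySem.List.pyRange_one_cons (by omega),
        PySem.List.pyRange_one_cons (by omega), PySem.List.pyRange_one_eq_nil (by omega)]
      simp only [List.cons.injEq]
      norm_num
      omega
    rw [PySem.List.pyRange_one_append 1 (n - 2) (n + 1) (by omega) (by omega), htail,
      List.filter_append, hP, hL]
    congr 1
    simp [pv_pvQ_true _ hdn2, pv_pvQ_true _ hdn, pv_pvQ_false _ hdn1]
  · -- n ≡ 2: L = n, P = n-1, tail of range = [n-1, n]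
    have hdn : ¬ 3 ∣ n := by omega
    have hdn1 : ¬ 3 ∣ (n - 1) := by omega
    have hL : pvL n = n := by
      rw [pvL, if_neg (fun hc => hdn ((PySem.Int.mod_eq_zero_iff_dvd n 3).mp hc))]
    have hP : pvP n = n - 1 := by
      rw [pvP, hL, if_neg (fun hc => hdn1 ((PySem.Int.mod_eq_zero_iff_dvd _ 3).mp hc))]
    have htail : PySem.List.pyRange (n - 1) (n + 1) = [n - 1, n] := by
      rw [PySem.List.pyRange_one_cons (by omega), PySem.List.pyRange_one_cons (by omega),
        PySem.List.pyRange_one_eq_nil (by omega)]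
      simp only [List.cons.injEq]
      norm_num
    rw [PySem.List.pyRange_one_append 1 (n - 1) (n + 1) (by omega) (by omega), htail,
      List.filter_append, hP, hL]
    congr 1
    simp [pv_pvQ_true _ hdn1, pv_pvQ_true _ hdn]

theorem pv_M_decomp (n : Int) (h2 : 2 ≤ n) :
    pvM n = (((PySem.List.pyRange 1 (pvP n)).filter pvQ).map PySem.Int.toStr) ++
      [PySem.Int.toStr (pvP n), PySem.Int.toStr (pvL n)] := by
  rw [pvM, pv_decomp n h2, List.map_append]
  rfl

theorem pv_unchanged (n : Int) (h1 : 1 ≤ n) (hD : ¬ D_solution n) :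
    solution n = solution_alt n := by
  rw [pv_A_run, pv_alt_filter' n (by omega)]
  by_cases h2 : 2 ≤ n
  · set ys := (((PySem.List.pyRange 1 (pvP n)).filter pvQ).map PySem.Int.toStr) with hys
    have hM := pv_M_decomp n h2
    by_cases hpL : pvP3 (PySem.Int.toStr (pvL n)) = true
    · by_cases hpPt : pvP3 (PySem.Int.toStr (pvP n)) = true
      · exact absurd ⟨h2, hpL, hpPt⟩ hD
      have hpP : pvP3 (PySem.Int.toStr (pvP n)) = false := by simpa using hpPt
      rw [hM]
      rw [pv_run_last_pair pvP3 _ _ hpP hpL ys false ""]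
      rw [List.filter_append]
      rw [show List.filter (fun s => !pvP3 s)
          [PySem.Int.toStr (pvP n), PySem.Int.toStr (pvL n)] = [PySem.Int.toStr (pvP n)] by
        simp [hpP, hpL]]
      rw [pv_getLastD_concat]
    · have hpL' : pvP3 (PySem.Int.toStr (pvL n)) = false := by simpa using hpL
      rw [hM]
      rw [show ys ++ [PySem.Int.toStr (pvP n), PySem.Int.toStr (pvL n)] =
        (ys ++ [PySem.Int.toStr (pvP n)]) ++ [PySem.Int.toStr (pvL n)] by simp]
      rw [pv_run_last_good pvP3 _ hpL' _ false ""]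
      rw [List.filter_append]
      rw [show List.filter (fun s => !pvP3 s) [PySem.Int.toStr (pvL n)] =
        [PySem.Int.toStr (pvL n)] by simp [hpL']]
      rw [pv_getLastD_concat]
  · have hn1 : n = 1 := by omega
    subst hn1
    decide

-- ===== VERDICT (by name: the statements are the Claim_ definitions above) =====
theorem solution_spec : Claim_unchanged_solution := by
  intro n _ hPre hD
  exact pv_unchanged n hPre hD

theorem solution_changed : Claim_changed_solution := by
  unfold Claim_changed_solution
  refine ⟨by decide, by decide, by decide, ?_, by decide, by decide⟩
  rw [show solution pvDiffWitness_solution = solution 32 from rfl, pv_A_run]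
  decide

theorem solution_tight : Claim_exact_solution := by
  intro n _ hPre hD
  obtain ⟨h2, hpL, hpP⟩ := hD
  intro heq
  have hrun := pv_A_run n
  have halt := pv_alt_filter' n (by omega)
  have hno3 : pvP3 (solution_alt n) = false := by
    rw [halt]; exact pv_filter_last_no3 _
  have hyes3 : pvP3 (solution n) = true := by
    rw [hrun, pv_M_decomp n h2]
    rcases pv_run_last_pp pvP3 _ _ hpP hpL
      (((PySem.List.pyRange 1 (pvP n)).filter pvQ).map PySem.Int.toStr) false "" with h | h
    · rw [h]; exact hpP
    · rw [h]; exact hpL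
  rw [heq, hno3] at hyes3
  exact absurd hyes3 (by simp)
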